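-- pv_equiv track=rewrite | github.com/athipan1/PaiNaiDee_Backend | src/services/external_data_service.py | _categorize_place
-- ===== SOURCE A (Python) =====
-- def _categorize_place(types_or_category) -> str:
--     """Categorize place based on types or category"""
--     if isinstance(types_or_category, list):
--         types = [t.lower() for t in types_or_category]
--     else:
--         types = [str(types_or_category).lower()]
--
--     # Category mapping - order matters for priority (specific to general)
--     category_mapping = [
--         ('temple', 'วัด'),
--         ('religious', 'วัด'),
--         ('place_of_worship', 'วัด'),
--         ('beach', 'ชายหาด'),
--         ('mountain', 'ภูเขา'),
--         ('natural_feature', 'ธรรมชาติ'),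
--         ('museum', 'พิพิธภัณฑ์'),
--         ('park', 'สวนสาธารณะ'),
--         ('cultural', 'วัฒนธรรม'),
--         ('tourist_attraction', 'สถานที่ท่องเที่ยว')
--     ]
--
--     # Check each mapping in priority order
--     for keyword, category in category_mapping:
--         for type_name in types:
--             if keyword in type_name:
--                 return category
--
--     return 'สถานที่ท่องเที่ยว'  # Default category
-- ===== SOURCE B (Python) =====
-- _CATEGORY_MAPPING = [
--     ('temple', 'วัด'),
--     ('religious', 'วัด'),
--     ('place_of_worship', 'วัด'),
--     ('beach', 'ชายหาด'),
--     ('mountain', 'ภูเขา'),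
--     ('natural_feature', 'ธรรมชาติ'),
--     ('museum', 'พิพิธภัณฑ์'),
--     ('park', 'สวนสาธารณะ'),
--     ('cultural', 'วัฒนธรรม'),
--     ('tourist_attraction', 'สถานที่ท่องเที่ยว')
-- ]
--
--
-- def _first_rank(type_name):
--     """Rank (priority index) and category of the first keyword contained in type_name, or None."""
--     for rank, (keyword, category) in enumerate(_CATEGORY_MAPPING):
--         if keyword in type_name:
--             return (rank, category)
--     return None
--
--
-- def _categorize_place(types_or_category) -> str:
--     """Categorize place based on types or category (single pass over types, best-rank accumulator)."""
--     if isinstance(types_or_category, list):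
--         types = [t.lower() for t in types_or_category]
--     else:
--         types = [str(types_or_category).lower()]
--
--     best = None  # (rank, category) with the lowest rank seen so far
--     for type_name in types:
--         cand = _first_rank(type_name)
--         if cand is not None and (best is None or cand[0] < best[0]):
--             best = cand
--
--     return best[1] if best is not None else 'สถานที่ท่องเที่ยว'
-- ===== Notes on version B (the rewrite author's own statement) =====
-- stated objective: alternative
-- what changed: Flipped the loop nesting: instead of scanning keywords in priority order and returning on the first one contained in any type, B makes a single pass over the types, computing each type's first-matching keyword rank and keeping a minimum-rank accumulator, returning the best category (or the default) at the end.
import Mathlib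
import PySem

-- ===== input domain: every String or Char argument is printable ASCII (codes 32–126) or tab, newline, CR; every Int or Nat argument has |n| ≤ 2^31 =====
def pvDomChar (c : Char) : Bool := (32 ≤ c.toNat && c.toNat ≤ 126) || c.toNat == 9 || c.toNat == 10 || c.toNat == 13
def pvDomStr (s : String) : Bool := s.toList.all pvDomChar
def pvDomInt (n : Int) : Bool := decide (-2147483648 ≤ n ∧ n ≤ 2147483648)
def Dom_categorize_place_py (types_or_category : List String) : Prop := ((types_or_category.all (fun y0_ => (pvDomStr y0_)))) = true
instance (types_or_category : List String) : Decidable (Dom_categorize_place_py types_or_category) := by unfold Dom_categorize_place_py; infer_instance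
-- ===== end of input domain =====

-- B flips the loop nesting: one pass over the types with a minimum-rank accumulator instead of
-- scanning keywords in priority order and returning on the first match (objective: alternative).
-- The Lean argument is List String, so only A's list branch is exercised (the scalar branch of the
-- Python is unreachable under the type convention).

-- ===== PORT A =====
-- category_mapping, shared literal of both Pythons
def pvMapping : List (String × String) :=
  [("temple", "วัด"), ("religious", "วัด"), ("place_of_worship", "วัด"),
   ("beach", "ชายหาด"), ("mountain", "ภูเขา"), ("natural_feature", "ธรรมชาติ"),
   ("museum", "พิพิธภัณฑ์"), ("park", "สวนสาธารณะ"), ("cultural", "วัฒนธรรม"),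
   ("tourist_attraction", "สถานที่ท่องเที่ยว")]

-- inner loop: 'for type_name in types: if keyword in type_name: return category' (the found flag)
def pvAInner (kw : String) (types : List String) : Bool :=
  match types with
  | [] => false
  | t :: ts => if PySem.Str.isIn kw t then true else pvAInner kw ts

-- outer loop over the mapping, default on fall-through
def pvALoop (mapping : List (String × String)) (types : List String) : String :=
  match mapping with
  | [] => "สถานที่ท่องเที่ยว"
  | (kw, cat) :: rest => if pvAInner kw types then cat else pvALoop rest types

def categorize_place_py (types_or_category : List String) : String :=
  pvALoop pvMapping (types_or_category.map PySem.Str.lower)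

-- ===== PORT B =====
-- _first_rank: enumerate the mapping, return (rank, category) of the first keyword in type_name
def pvFirstRank (mapping : List (String × String)) (rank : Nat) (t : String) : Option (Nat × String) :=
  match mapping with
  | [] => none
  | (kw, cat) :: rest => if PySem.Str.isIn kw t then some (rank, cat) else pvFirstRank rest (rank + 1) t

-- the accumulator update: keep best unless cand has a strictly lower rank
def pvCombine (best cand : Option (Nat × String)) : Option (Nat × String) :=
  match best, cand with
  | none, c => c
  | some b, none => some b
  | some b, some p => if p.1 < b.1 then some p else some b

-- single pass over types
def pvBLoop (types : List String) (best : Option (Nat × String)) : Option (Nat × String) :=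
  match types with
  | [] => best
  | t :: ts => pvBLoop ts (pvCombine best (pvFirstRank pvMapping 0 t))

def categorize_place_py_alt (types_or_category : List String) : String :=
  match pvBLoop (types_or_category.map PySem.Str.lower) none with
  | some (_, cat) => cat
  | none => "สถานที่ท่องเที่ยว"

-- ===== PRECONDITION & SPEC =====
def Spec_categorize_place_py (types_or_category : List String) (out : String) : Prop := out = categorize_place_py_alt types_or_category
instance (types_or_category : List String) (out : String) : Decidable (Spec_categorize_place_py types_or_category out) := by unfold Spec_categorize_place_py; infer_instance

-- ===== CLAIM (what is proved, stated in full; the proofs are below) =====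
def Claim_equal_categorize_place_py : Prop := ∀ (types_or_category : List String), Dom_categorize_place_py types_or_category → Spec_categorize_place_py types_or_category (categorize_place_py types_or_category)

-- ===== LEMMAS AND PROOFS =====

-- index/category of the first mapping entry whose keyword occurs in SOME type (priority order)
def pvF (mapping : List (String × String)) (types : List String) : Option (Nat × String) :=
  match mapping with
  | [] => none
  | (kw, cat) :: rest =>
    if pvAInner kw types then some (0, cat)
    else (pvF rest types).map (fun p => (p.1 + 1, p.2))

theorem pvAInner_nil (kw : String) : pvAInner kw [] = false := rfl

theorem pvAInner_cons (kw t : String) (ts : List String) :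
    pvAInner kw (t :: ts) = (PySem.Str.isIn kw t || pvAInner kw ts) := by
  simp only [pvAInner]
  cases PySem.Str.isIn kw t <;> simp

theorem pvAInner_singleton (kw t : String) : pvAInner kw [t] = PySem.Str.isIn kw t := by
  simp [pvAInner_cons, pvAInner_nil]

theorem pvALoop_eq_pvF (mapping : List (String × String)) (types : List String) :
    pvALoop mapping types = ((pvF mapping types).map Prod.snd).getD "สถานที่ท่องเที่ยว" := by
  induction mapping with
  | nil => rfl
  | cons hd rest ih =>
    obtain ⟨kw, cat⟩ := hd
    simp only [pvALoop, pvF]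
    by_cases h : pvAInner kw types
    · simp [h]
    · simp only [h, if_false, ih]
      cases pvF rest types <;> simp

theorem pvFirstRank_shift (mapping : List (String × String)) (r : Nat) (t : String) :
    pvFirstRank mapping r t = (pvF mapping [t]).map (fun p => (p.1 + r, p.2)) := by
  induction mapping generalizing r with
  | nil => rfl
  | cons hd rest ih =>
    obtain ⟨kw, cat⟩ := hd
    simp only [pvFirstRank, pvF, pvAInner_singleton]
    cases h : PySem.Str.isIn kw t
    · simp only [Bool.false_eq_true, if_false, ih (r + 1)]
      cases pvF rest [t] <;> simp <;> omega
    · simp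

theorem pvCombine_none_right (a : Option (Nat × String)) : pvCombine a none = a := by
  cases a <;> rfl

theorem pvCombine_assoc (a b c : Option (Nat × String)) :
    pvCombine (pvCombine a b) c = pvCombine a (pvCombine b c) := by
  rcases a with _ | ⟨a1, a2⟩ <;> rcases b with _ | ⟨b1, b2⟩ <;> rcases c with _ | ⟨c1, c2⟩ <;>
    simp only [pvCombine] <;> split_ifs <;>
      simp only [pvCombine] <;> split_ifs <;> first | rfl | omega

-- shifting every rank by one commutes with taking the better of two candidates
theorem pvCombine_map_succ (x y : Option (Nat × String)) :
    pvCombine (x.map (fun p => (p.1 + 1, p.2))) (y.map (fun p => (p.1 + 1, p.2))) =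
      (pvCombine x y).map (fun p => (p.1 + 1, p.2)) := by
  rcases x with _ | ⟨x1, x2⟩ <;> rcases y with _ | ⟨y1, y2⟩ <;> simp [pvCombine] <;>
    split_ifs <;> first | simp | (exfalso; omega)

-- pvF distributes over splitting off the first type, via pvCombine
theorem pvF_cons (mapping : List (String × String)) (t : String) (ts : List String) :
    pvF mapping (t :: ts) = pvCombine (pvF mapping [t]) (pvF mapping ts) := by
  induction mapping with
  | nil => rfl
  | cons hd rest ih =>
    obtain ⟨kw, cat⟩ := hd
    simp only [pvF, pvAInner_cons, pvAInner_nil, Bool.or_false]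
    cases h : PySem.Str.isIn kw t
    · cases h2 : pvAInner kw ts
      · simp only [h, Bool.false_or, Bool.false_eq_true, if_false, ih, pvCombine_map_succ]
      · simp only [h, h2, Bool.false_or, Bool.false_eq_true, if_false, if_true]
        cases hx : pvF rest [t] <;> simp [pvCombine]
    · simp only [h, Bool.true_or, if_true]
      cases h2 : pvAInner kw ts
      · simp only [h2, Bool.false_eq_true, if_false]
        cases hy : pvF rest ts <;> simp [pvCombine]
      · simp [h2, pvCombine]

theorem pvBLoop_eq (types : List String) (best : Option (Nat × String)) :
    pvBLoop types best = pvCombine best (pvF pvMapping types) := by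
  induction types generalizing best with
  | nil =>
    rw [show pvF pvMapping [] = none from rfl, pvCombine_none_right]
    rfl
  | cons t ts ih =>
    show pvBLoop ts (pvCombine best (pvFirstRank pvMapping 0 t)) = _
    rw [ih, pvF_cons, ← pvCombine_assoc]
    congr 2
    rw [pvFirstRank_shift]
    cases pvF pvMapping [t] <;> simp

-- ===== VERDICT (by name: the statement is the Claim_ definition above) =====
theorem categorize_place_py_spec : Claim_equal_categorize_place_py := by
  intro types _
  unfold Spec_categorize_place_py categorize_place_py categorize_place_py_alt
  rw [pvBLoop_eq, pvALoop_eq_pvF]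
  cases pvF pvMapping (types.map PySem.Str.lower) <;> simp [pvCombine]
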